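-- pv_equiv track=rewrite | github.com/mchoi5041/learn_voca | run.py | truncate_word
-- ===== SOURCE A (Python) =====
-- do_stemming = False
--
-- def truncate_word(word):
-- 	start = 0
-- 	while start < len(word) and word[start].isalpha() == False:
-- 		start += 1
-- 	end = len(word)
-- 	while end > start and word[end-1].isalpha() == False:
-- 		end -= 1
-- 	truncated = word[start:end].lower()
-- 	for letter in truncated:
-- 		if letter.isalpha():
-- 			break
-- 	else:
-- 		return ''
-- 	if truncated.find('http://') == 0:
-- 		return ''
-- 	if do_stemming == True:
-- 		if len(truncated) == 0:
-- 			return ''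
-- 	else:
-- 		return truncated
-- ===== SOURCE B (Python) =====
-- def truncate_word(word):
--     out = []
--     pending = []
--     for c in word:
--         if c.isalpha():
--             out.extend(pending)
--             pending.clear()
--             out.append(c.lower())
--         elif out:
--             pending.append(c.lower())
--     if not out:
--         return ''
--     t = ''.join(out)
--     if t.startswith('http://'):
--         return ''
--     return t
-- ===== Notes on version B (the rewrite author's own statement) =====
-- stated objective: alternative
-- what changed: Replaces A's two boundary-scanning while-loops, slice, lowercasing pass, for/else alpha re-scan and find()==0 test by a single forward fold with an output list and a pending buffer of interior non-alpha characters that builds the trimmed lowercased string directly.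
import Mathlib
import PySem

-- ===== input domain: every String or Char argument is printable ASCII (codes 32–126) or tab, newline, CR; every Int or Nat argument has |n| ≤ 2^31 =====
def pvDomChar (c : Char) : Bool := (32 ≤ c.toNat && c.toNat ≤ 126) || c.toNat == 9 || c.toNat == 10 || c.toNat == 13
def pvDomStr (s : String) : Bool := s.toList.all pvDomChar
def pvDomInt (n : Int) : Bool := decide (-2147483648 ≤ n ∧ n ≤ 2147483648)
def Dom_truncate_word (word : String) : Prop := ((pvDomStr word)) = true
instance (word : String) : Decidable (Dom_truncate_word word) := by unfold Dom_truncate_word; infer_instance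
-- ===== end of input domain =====

-- B replaces A's boundary scans + slice + re-scan by one forward fold with an
-- out/pending accumulator pair that builds the trimmed lowercased string directly.

-- ===== PORT A =====
-- while start < len(word) and word[start].isalpha() == False: start += 1
def awStart : List Char → Nat → Nat
  | [], s => s
  | c :: rest, s => if PySem.Chars.isalpha c = false then awStart rest (s + 1) else s

-- while end > start and word[end-1].isalpha() == False: end -= 1   (recursion on end)
def awEnd (cs : List Char) (start : Nat) : Nat → Nat
  | 0 => 0
  | e + 1 => if start ≤ e ∧ PySem.Chars.isalpha (cs.getD e ' ') = false then awEnd cs start e else e + 1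

-- for letter in truncated: if letter.isalpha(): break / else: return ''
def aAnyAlpha : List Char → Bool
  | [] => false
  | c :: rest => if PySem.Chars.isalpha c then true else aAnyAlpha rest

def truncate_word (word : String) : String :=
  let cs := word.toList
  let start := awStart cs 0
  let e := awEnd cs start cs.length
  let truncated := PySem.Chars.lower (PySem.List.slice cs (some (start : Int)) (some (e : Int)))
  if aAnyAlpha truncated = false then ""
  else if PySem.Chars.find truncated "http://".toList = 0 then ""
  else String.mk truncated

-- ===== PORT B =====
-- for c in word: if c.isalpha(): out += pending + [c.lower()]; pending = []
--                elif out: pending += [c.lower()]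
def bLoop : List Char → List Char → List Char → List Char
  | [], out, _ => out
  | c :: rest, out, pending =>
    if PySem.Chars.isalpha c then bLoop rest (out ++ pending ++ [PySem.Chars.lowerChar c]) []
    else if out ≠ [] then bLoop rest out (pending ++ [PySem.Chars.lowerChar c])
    else bLoop rest out pending

def truncate_word_alt (word : String) : String :=
  let out := bLoop word.toList [] []
  if out = [] then ""
  else if PySem.Chars.startswith out "http://".toList then "" else String.mk out

-- ===== PRECONDITION & SPEC =====
def Spec_truncate_word (word : String) (out : String) : Prop := out = truncate_word_alt word
instance (word : String) (out : String) : Decidable (Spec_truncate_word word out) := by unfold Spec_truncate_word; infer_instance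

-- ===== CLAIM (what is proved, stated in full; the proofs are below) =====
def Claim_equal_truncate_word : Prop := ∀ (word : String), Dom_truncate_word word → Spec_truncate_word word (truncate_word word)

-- ===== LEMMAS AND PROOFS =====

-- the predicate "non-alphabetic"
def nal (c : Char) : Bool := !PySem.Chars.isalpha c

lemma awStart_eq (cs : List Char) (s : Nat) :
    awStart cs s = s + (cs.takeWhile nal).length := by
  induction cs generalizing s with
  | nil => simp [awStart]
  | cons c rest ih =>
    by_cases h : PySem.Chars.isalpha c
    · simp [awStart, h, List.takeWhile_cons, nal]
    · simp only [awStart, eq_false_of_ne_true h, if_pos rfl]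
      rw [ih]
      simp [List.takeWhile_cons, nal, h]
      omega

lemma dropWhile_eq_drop (p : Char → Bool) (l : List Char) :
    l.dropWhile p = l.drop (l.takeWhile p).length := by
  induction l with
  | nil => simp
  | cons c rest ih =>
    by_cases h : p c <;> simp [List.dropWhile_cons, List.takeWhile_cons, h, ih]

lemma rdropWhile_append (p : Char → Bool) (l1 l2 : List Char)
    (h : List.rdropWhile p l2 ≠ []) :
    List.rdropWhile p (l1 ++ l2) = l1 ++ List.rdropWhile p l2 := by
  have h' : (List.dropWhile p l2.reverse).isEmpty = false := by
    simpa [List.rdropWhile, List.isEmpty_iff] using h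
  simp [List.rdropWhile, List.dropWhile_append, h']

lemma awEnd_eq (cs : List Char) (start : Nat) :
    ∀ e, start ≤ e → e ≤ cs.length →
      awEnd cs start e = start + (((cs.take e).drop start).rdropWhile nal).length := by
  intro e
  induction e with
  | zero => intro h1 _; simp [awEnd]; omega
  | succ e ih =>
    intro h1 h2
    have he : e < cs.length := by omega
    have htake : cs.take (e + 1) = cs.take e ++ [cs[e]] := by
      rw [List.take_add_one]
      simp [List.getElem?_eq_getElem he]
    have hlen : (cs.take e).length = e := by simp; omega
    by_cases hc : start ≤ e ∧ PySem.Chars.isalpha (cs.getD e ' ') = false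
    · have hget : cs.getD e ' ' = cs[e] := List.getD_eq_getElem cs ' ' he
      have hnal : nal cs[e] = true := by simp [nal]; rw [← hget]; exact hc.2
      rw [awEnd, if_pos hc, ih hc.1 (by omega), htake,
        List.drop_append_of_le_length (by omega),
        List.rdropWhile_concat_pos _ _ _ hnal]
    · rw [awEnd, if_neg hc]
      rcases Nat.lt_or_ge e start with hlt | hge
      · have : start = e + 1 := by omega
        subst this
        have : ((cs.take (e + 1)).drop (e + 1)) = [] := by
          apply List.drop_eq_nil_of_le; simp
        rw [this]; simp [List.rdropWhile]
      · have hget : cs.getD e ' ' = cs[e] := List.getD_eq_getElem cs ' ' he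
        have halpha : PySem.Chars.isalpha cs[e] = true := by
          rcases Bool.eq_false_or_eq_true (PySem.Chars.isalpha cs[e]) with h | h
          · exact h
          · exact absurd ⟨hge, by rw [hget]; exact h⟩ hc
        have hnal : ¬ nal cs[e] = true := by simp [nal, halpha]
        rw [htake, List.drop_append_of_le_length (by omega),
          List.rdropWhile_concat_neg _ _ _ hnal]
        simp [hlen]
        omega

-- the common "core": the original characters with non-alpha edges trimmed
def core (cs : List Char) : List Char := (cs.dropWhile nal).rdropWhile nal

-- A's truncated (before lower) is `core`
lemma trunkA_eq (cs : List Char) :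
    PySem.List.slice cs (some ((awStart cs 0 : Nat) : Int))
      (some ((awEnd cs (awStart cs 0) cs.length : Nat) : Int)) = core cs := by
  have hstart : awStart cs 0 = (cs.takeWhile nal).length := by
    rw [awStart_eq]; omega
  have hle : (cs.takeWhile nal).length ≤ cs.length := (List.takeWhile_prefix nal).length_le
  have hend := awEnd_eq cs (awStart cs 0) cs.length (by omega) (le_refl _)
  rw [PySem.List.slice_natCast, hend, hstart]
  simp only [List.take_length]
  rw [← dropWhile_eq_drop]
  have harith : (cs.takeWhile nal).length + ((cs.dropWhile nal).rdropWhile nal).length -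
      (cs.takeWhile nal).length = ((cs.dropWhile nal).rdropWhile nal).length := by omega
  rw [harith]
  have hpre : (cs.dropWhile nal).rdropWhile nal <+: cs.dropWhile nal :=
    List.rdropWhile_prefix nal _
  rw [core, ← List.prefix_iff_eq_take.mp hpre]

-- rdropWhile on a cons whose head is kept
lemma rdrop_cons_alpha (c : Char) (rest : List Char) (hc : ¬ nal c = true) :
    List.rdropWhile nal (c :: rest) =
      if List.rdropWhile nal rest = [] then [c] else c :: List.rdropWhile nal rest := by
  by_cases h : List.rdropWhile nal rest = []
  · have hall : ∀ x ∈ rest, nal x = true := List.rdropWhile_eq_nil_iff.mp h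
    have : List.dropWhile nal rest.reverse = [] := by
      rw [List.dropWhile_eq_nil_iff]; intro x hx; exact hall x (List.mem_reverse.mp hx)
    simp [h, List.rdropWhile, List.dropWhile_append, this, hc]
  · rw [if_neg h]
    have := rdropWhile_append nal [c] rest h
    simpa using this

-- no alpha in cs ↔ the right-trim empties cs
lemma rdrop_nil_iff (cs : List Char) :
    List.rdropWhile nal cs = [] ↔ cs.any PySem.Chars.isalpha = false := by
  rw [List.rdropWhile_eq_nil_iff]
  simp [nal, List.any_eq_false]

-- invariant of B's loop once out is nonempty
lemma bLoop_run (cs : List Char) : ∀ out pending, out ≠ [] →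
    bLoop cs out pending = out ++
      (if cs.any PySem.Chars.isalpha then pending ++ PySem.Chars.lower (cs.rdropWhile nal) else []) := by
  induction cs with
  | nil => intro out pending _; simp [bLoop, List.rdropWhile]
  | cons c rest ih =>
    intro out pending hout
    by_cases hc : PySem.Chars.isalpha c
    · rw [bLoop, if_pos hc, ih _ [] (by simp), rdrop_cons_alpha c rest (by simp [nal, hc])]
      by_cases hr : List.rdropWhile nal rest = []
      · have : rest.any PySem.Chars.isalpha = false := (rdrop_nil_iff rest).mp hr
        simp [hr, this, hc, PySem.Chars.lower]
      · have : rest.any PySem.Chars.isalpha = true := by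
          rcases Bool.eq_false_or_eq_true (rest.any PySem.Chars.isalpha) with h | h
          · exact h
          · exact absurd ((rdrop_nil_iff rest).mpr h) hr
        simp [hr, this, hc, PySem.Chars.lower]
    · rw [bLoop, if_neg hc, if_pos hout, ih _ _ hout]
      by_cases hr : List.rdropWhile nal rest = []
      · have h2 : rest.any PySem.Chars.isalpha = false := (rdrop_nil_iff rest).mp hr
        simp [h2, hc]
      · have h2 : rest.any PySem.Chars.isalpha = true := by
          rcases Bool.eq_false_or_eq_true (rest.any PySem.Chars.isalpha) with h | h
          · exact h
          · exact absurd ((rdrop_nil_iff rest).mpr h) hr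
        rw [show c :: rest = [c] ++ rest from rfl, rdropWhile_append nal [c] rest hr]
        simp [h2, hc, PySem.Chars.lower]

-- B's loop from the initial state computes the lowered core
lemma bLoop_eq_core (cs : List Char) : bLoop cs [] [] = PySem.Chars.lower (core cs) := by
  induction cs with
  | nil => simp [bLoop, core, List.rdropWhile, PySem.Chars.lower]
  | cons c rest ih =>
    by_cases hc : PySem.Chars.isalpha c
    · rw [bLoop, if_pos hc, bLoop_run rest _ [] (by simp)]
      have hcore : core (c :: rest) = List.rdropWhile nal (c :: rest) := by
        simp [core, List.dropWhile_cons, nal, hc]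
      rw [hcore, rdrop_cons_alpha c rest (by simp [nal, hc])]
      by_cases hr : List.rdropWhile nal rest = []
      · have : rest.any PySem.Chars.isalpha = false := (rdrop_nil_iff rest).mp hr
        simp [hr, this, PySem.Chars.lower]
      · have : rest.any PySem.Chars.isalpha = true := by
          rcases Bool.eq_false_or_eq_true (rest.any PySem.Chars.isalpha) with h | h
          · exact h
          · exact absurd ((rdrop_nil_iff rest).mpr h) hr
        simp [hr, this, PySem.Chars.lower]
    · rw [bLoop, if_neg hc, if_neg (by simp)]
      rw [ih]
      simp [core, List.dropWhile_cons, nal, hc]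

lemma find_eq_zero_iff (t sub : List Char) :
    PySem.Chars.find t sub = 0 ↔ sub <+: t := by
  constructor
  · intro h
    have h0 : PySem.Chars.findFrom t sub ((0 : Nat) : Int) ≠ -1 := by
      rw [show ((0 : Nat) : Int) = 0 by norm_num, PySem.Chars.findFrom_zero, h]; norm_num
    obtain ⟨_, hp, _⟩ := PySem.Chars.findFrom_natCast_spec t sub 0 (Nat.zero_le _) h0
    rw [show ((0 : Nat) : Int) = 0 by norm_num, PySem.Chars.findFrom_zero, h] at hp
    simpa using hp
  · intro h
    have hne : PySem.Chars.findFrom t sub ((0 : Nat) : Int) ≠ -1 := by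
      rw [Ne, PySem.Chars.findFrom_natCast_eq_neg_one_iff t sub 0 (Nat.zero_le _)]
      simp
      exact h.isInfix
    obtain ⟨hge, _, hmin⟩ := PySem.Chars.findFrom_natCast_spec t sub 0 (Nat.zero_le _) hne
    have hv : (PySem.Chars.findFrom t sub ((0 : Nat) : Int)).toNat = 0 := by
      by_contra hne0
      exact hmin 0 (Nat.zero_le _) (by omega) (by simpa using h)
    have : PySem.Chars.findFrom t sub ((0 : Nat) : Int) = 0 := by omega
    rw [show ((0 : Nat) : Int) = 0 by norm_num, PySem.Chars.findFrom_zero] at this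
    exact this

lemma char_le_iff (a b : Char) : a ≤ b ↔ a.toNat ≤ b.toNat := by
  rw [Char.le_def, UInt32.le_iff_toNat_le]; rfl

lemma isalpha_lowerChar (c : Char) (h : PySem.Chars.isalpha c = true) :
    PySem.Chars.isalpha (PySem.Chars.lowerChar c) = true := by
  have hA : ('A').toNat = 65 := by decide
  have hZ : ('Z').toNat = 90 := by decide
  have ha : ('a').toNat = 97 := by decide
  have hz : ('z').toNat = 122 := by decide
  unfold PySem.Chars.lowerChar
  by_cases hu : PySem.Chars.isupper c = true
  · rw [if_pos hu]
    simp only [PySem.Chars.isupper, Bool.and_eq_true, decide_eq_true_eq, char_le_iff,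
      hA, hZ] at hu
    have hvalid : Nat.isValidChar (c.toNat + 32) := Or.inl (by omega)
    have hto : (Char.ofNat (c.toNat + 32)).toNat = c.toNat + 32 := by
      unfold Char.ofNat
      rw [dif_pos hvalid]
      unfold Char.ofNatAux Char.toNat
      simp
      omega
    simp only [PySem.Chars.isalpha, PySem.Chars.isupper, PySem.Chars.islower,
      Bool.or_eq_true, Bool.and_eq_true, decide_eq_true_eq, char_le_iff, hA, hZ, ha, hz, hto]
    right
    omega
  · rw [if_neg hu]
    simp only [PySem.Chars.isalpha, Bool.or_eq_true] at h ⊢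
    rcases h with h | h
    · exact absurd h hu
    · exact Or.inr h

lemma aAnyAlpha_cons_alpha (c : Char) (l : List Char)
    (h : PySem.Chars.isalpha c = true) : aAnyAlpha (c :: l) = true := by
  simp [aAnyAlpha, h]

-- ===== VERDICT (by name: the statement is the Claim_ definition above) =====
theorem truncate_word_spec : Claim_equal_truncate_word := by
  intro word _
  unfold Spec_truncate_word truncate_word truncate_word_alt
  set cs := word.toList with hcs
  simp only []
  rw [trunkA_eq cs, bLoop_eq_core cs]
  by_cases hcore : core cs = []
  · simp [hcore, PySem.Chars.lower, aAnyAlpha]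
  · -- core is nonempty; its head is alphabetic
    have hdwne : cs.dropWhile nal ≠ [] := by
      intro hnil
      exact hcore (by simp [core, hnil, List.rdropWhile])
    have hlne : PySem.Chars.lower (core cs) ≠ [] := by
      simp [PySem.Chars.lower, hcore]
    have hany : aAnyAlpha (PySem.Chars.lower (core cs)) = true := by
      rcases hc : core cs with _ | ⟨c, l⟩
      · exact absurd hc hcore
      · have hc_alpha : PySem.Chars.isalpha c = true := by
          have hpre2 : core cs <+: cs.dropWhile nal := by
            rw [core]; exact List.rdropWhile_prefix nal _
          have h2 : (cs.dropWhile nal).head? = some c := by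
            obtain ⟨t, ht⟩ := hpre2
            rw [← ht, hc]
            simp
          have h3 : (cs.dropWhile nal).head? = some ((cs.dropWhile nal).head hdwne) :=
            List.head?_eq_head hdwne
          have hcc : (cs.dropWhile nal).head hdwne = c := by
            rw [h3] at h2
            exact Option.some_inj.mp h2
          have := List.head_dropWhile_not nal hdwne
          rw [hcc] at this
          simpa [nal] using this
        rw [PySem.Chars.lower, List.map_cons]
        exact aAnyAlpha_cons_alpha _ _ (isalpha_lowerChar c hc_alpha)
    rw [hany]
    simp only [Bool.true_eq_false, if_false, if_neg hlne]
    by_cases hpre : "http://".toList <+: PySem.Chars.lower (core cs)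
    · rw [if_pos ((find_eq_zero_iff _ _).mpr hpre),
        if_pos ((PySem.Chars.startswith_iff _ _).mpr hpre)]
    · rw [if_neg (fun h => hpre ((find_eq_zero_iff _ _).mp h)),
        if_neg (by rw [PySem.Chars.startswith_iff]; exact hpre)]
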